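-- pv_equiv track=rewrite | github.com/momotosushi/mapcomponentswebinar | src/Data/modfiy.py | expand_days
-- ===== SOURCE A (Python) =====
-- days_mapping = {
--     "Mo": "Montag",
--     "Tu": "Dienstag",
--     "We": "Mittwoch",
--     "Th": "Donnerstag",
--     "Fr": "Freitag",
--     "Sa": "Samstag",
--     "Su": "Sonntag",
-- }
--
-- def expand_days(days):
--     """Expand day ranges and individual days into a list of valid day abbreviations."""
--     day_list = []
--     ranges = days.split(",")
--     for r in ranges:
--         if "-" in r:
--             start, end = r.split("-")
--             if start in days_mapping and end in days_mapping:  # Validate day abbreviations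
--                 start_idx = list(days_mapping.keys()).index(start)
--                 end_idx = list(days_mapping.keys()).index(end)
--                 if start_idx <= end_idx:
--                     day_list.extend(list(days_mapping.keys())[start_idx:end_idx + 1])
--                 else:  # Handle wrap-around (e.g., "Fr-Mo")
--                     day_list.extend(list(days_mapping.keys())[start_idx:])
--                     day_list.extend(list(days_mapping.keys())[:end_idx + 1])
--         elif r in days_mapping:  # Validate individual day abbreviation
--             day_list.append(r)
--     return day_list
-- ===== SOURCE B (Python) =====
-- days_mapping = {
--     "Mo": "Montag",
--     "Tu": "Dienstag",
--     "We": "Mittwoch",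
--     "Th": "Donnerstag",
--     "Fr": "Freitag",
--     "Sa": "Samstag",
--     "Su": "Sonntag",
-- }
--
-- _KEYS = list(days_mapping.keys())
--
--
-- def _expand_token(r):
--     """Days contributed by one comma-separated token, via one modular walk."""
--     if "-" in r:
--         start, end = r.split("-")
--         if start in days_mapping and end in days_mapping:
--             si = _KEYS.index(start)
--             ei = _KEYS.index(end)
--             return [_KEYS[(si + k) % 7] for k in range((ei - si) % 7 + 1)]
--         return []
--     return [r] if r in days_mapping else []
--
--
-- def expand_days(days):
--     """Expand day ranges and individual days into a list of valid day abbreviations."""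
--     return [d for tok in days.split(",") for d in _expand_token(tok)]
-- ===== Notes on version B (the rewrite author's own statement) =====
-- stated objective: simpler
-- what changed: Replaces A's two-branch slice-plus-wrap-around range expansion with a single modular walk over cyclic key indices, and builds the result as one flat comprehension over a per-token helper instead of an accumulating loop with extend/append.
-- outside the precondition, e.g. on expand_days('Mo-Tu-We'): A raises ValueError, B raises ValueError
import Mathlib
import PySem

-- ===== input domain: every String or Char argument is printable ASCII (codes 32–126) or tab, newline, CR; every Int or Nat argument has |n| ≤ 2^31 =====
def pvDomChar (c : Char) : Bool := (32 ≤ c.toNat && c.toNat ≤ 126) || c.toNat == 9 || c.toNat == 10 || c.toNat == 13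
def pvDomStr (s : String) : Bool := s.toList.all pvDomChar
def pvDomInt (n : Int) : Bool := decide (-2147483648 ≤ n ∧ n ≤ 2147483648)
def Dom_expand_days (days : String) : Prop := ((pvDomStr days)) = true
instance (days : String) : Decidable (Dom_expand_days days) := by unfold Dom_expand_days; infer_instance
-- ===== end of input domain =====

-- B replaces A's two-branch slice-and-wrap range expansion by a single modular walk
-- over cyclic indices and builds the result as one flat comprehension (objective: simpler).

-- ===== PORT A =====
-- str.split with a non-empty separator (split? is some there)
def pySplitA (s sep : String) : List String := (PySem.Str.split? s sep).getD []
-- the keys of days_mapping, in insertion order (the dict's values are never used)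
def daysKeysA : List String := ["Mo", "Tu", "We", "Th", "Fr", "Sa", "Su"]
def expand_days (days : String) : List String :=
  (pySplitA days ",").foldl (fun day_list r =>
    if PySem.Str.isIn "-" r then
      match pySplitA r "-" with
      | [start, stop] =>
        if daysKeysA.contains start && daysKeysA.contains stop then
          let start_idx := (PySem.List.index? daysKeysA start).getD 0
          let end_idx := (PySem.List.index? daysKeysA stop).getD 0
          if start_idx ≤ end_idx then
            day_list ++ PySem.List.slice daysKeysA (some (start_idx : Int)) (some ((end_idx : Int) + 1))
          else
            (day_list ++ PySem.List.slice daysKeysA (some (start_idx : Int)) none)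
              ++ PySem.List.slice daysKeysA none (some ((end_idx : Int) + 1))
        else day_list
      | _ => day_list   -- Python raises ValueError here (unpacking); excluded by Pre_
    else if daysKeysA.contains r then day_list ++ [r] else day_list) []

-- ===== PORT B =====
def pySplitB (s sep : String) : List String := (PySem.Str.split? s sep).getD []
def daysKeysB : List String := ["Mo", "Tu", "We", "Th", "Fr", "Sa", "Su"]
def expandTokenB (r : String) : List String :=
  if PySem.Str.isIn "-" r then
    -- `start, end = r.split("-")`: unpacks exactly two pieces (ValueError otherwise,
    -- excluded by Pre_; there this port returns [])
    let parts := pySplitB r "-"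
    if parts.length == 2 then
      let start := parts.getD 0 ""
      let stop := parts.getD 1 ""
      if daysKeysB.contains start && daysKeysB.contains stop then
        let si := (PySem.List.index? daysKeysB start).getD 0
        let ei := (PySem.List.index? daysKeysB stop).getD 0
        (List.range ((PySem.Int.mod ((ei : Int) - (si : Int)) 7 + 1).toNat)).map
          (fun k => daysKeysB.getD ((si + k) % 7) "")
      else []
    else []
  else if daysKeysB.contains r then [r] else []

def expand_days_alt (days : String) : List String :=
  (pySplitB days ",").flatMap expandTokenB

-- ===== PRECONDITION & SPEC =====
-- Pre_ excludes exactly the inputs where a comma-separated token contains more than one '-':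
-- there `start, end = r.split("-")` raises ValueError in A (and in B).
def Pre_expand_days (days : String) : Prop :=
  ∀ r ∈ ((PySem.Str.split? days ",").getD []),
    PySem.Str.isIn "-" r = true → ((PySem.Str.split? r "-").getD []).length = 2
instance (days : String) : Decidable (Pre_expand_days days) := by
  unfold Pre_expand_days; infer_instance
def pvWitness_expand_days : String := "Mo-We,Fr,Sa-Tu"
def Spec_expand_days (days : String) (out : List String) : Prop := out = expand_days_alt days
instance (days : String) (out : List String) : Decidable (Spec_expand_days days out) := by
  unfold Spec_expand_days; infer_instance

-- ===== CLAIM (what is proved, stated in full; the proofs are below) =====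
def Claim_equal_expand_days : Prop :=
  ∀ (days : String), Dom_expand_days days → Pre_expand_days days →
    Spec_expand_days days (expand_days days)

-- ===== LEMMAS AND PROOFS =====

-- A's loop body, factored as the list each token contributes
def expandTokenA (r : String) : List String :=
  if PySem.Str.isIn "-" r then
    match pySplitA r "-" with
    | [start, stop] =>
      if daysKeysA.contains start && daysKeysA.contains stop then
        let start_idx := (PySem.List.index? daysKeysA start).getD 0
        let end_idx := (PySem.List.index? daysKeysA stop).getD 0
        if start_idx ≤ end_idx then
          PySem.List.slice daysKeysA (some (start_idx : Int)) (some ((end_idx : Int) + 1))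
        else
          PySem.List.slice daysKeysA (some (start_idx : Int)) none
            ++ PySem.List.slice daysKeysA none (some ((end_idx : Int) + 1))
      else []
    | _ => []
  else if daysKeysA.contains r then [r] else []

lemma bodyA_append (day_list : List String) (r : String) :
    (if PySem.Str.isIn "-" r then
      match pySplitA r "-" with
      | [start, stop] =>
        if daysKeysA.contains start && daysKeysA.contains stop then
          let start_idx := (PySem.List.index? daysKeysA start).getD 0
          let end_idx := (PySem.List.index? daysKeysA stop).getD 0
          if start_idx ≤ end_idx then
            day_list ++ PySem.List.slice daysKeysA (some (start_idx : Int)) (some ((end_idx : Int) + 1))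
          else
            (day_list ++ PySem.List.slice daysKeysA (some (start_idx : Int)) none)
              ++ PySem.List.slice daysKeysA none (some ((end_idx : Int) + 1))
        else day_list
      | _ => day_list
    else if daysKeysA.contains r then day_list ++ [r] else day_list)
    = day_list ++ expandTokenA r := by
  unfold expandTokenA
  cases h : PySem.Str.isIn "-" r
  · simp only [Bool.false_eq_true, if_false]
    split_ifs <;> simp
  · simp only [if_true]
    cases hs : pySplitA r "-" with
    | nil => simp
    | cons a t =>
      cases t with
      | nil => simp
      | cons b t2 =>
        cases t2 with
        | nil =>
          dsimp only
          split_ifs <;> simp [List.append_assoc]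
        | cons c t3 => simp

lemma mem_daysKeysA_cases (s : String) (h : daysKeysA.contains s = true) :
    s = "Mo" ∨ s = "Tu" ∨ s = "We" ∨ s = "Th" ∨ s = "Fr" ∨ s = "Sa" ∨ s = "Su" := by
  simp [daysKeysA, List.contains_eq_mem] at h
  tauto

lemma pySplitB_eq (s sep : String) : pySplitB s sep = pySplitA s sep := rfl
lemma daysKeysB_eq : daysKeysB = daysKeysA := rfl

lemma token_eq (r : String) : expandTokenA r = expandTokenB r := by
  unfold expandTokenA expandTokenB
  rw [pySplitB_eq, daysKeysB_eq]
  cases h : PySem.Str.isIn "-" r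
  · rfl
  · simp only [if_true]
    cases hs : pySplitA r "-" with
    | nil => rfl
    | cons a t =>
      cases t with
      | nil => rfl
      | cons b t2 =>
        cases t2 with
        | nil =>
          dsimp only [List.length, List.getD]
          simp only [List.getElem?_cons_zero, List.getElem?_cons_succ, Option.getD_some,
            show ((0 : Nat) + 1 + 1 == 2) = true from rfl, if_true]
          by_cases ha : daysKeysA.contains a = true
          · by_cases hb : daysKeysA.contains b = true
            · rcases mem_daysKeysA_cases a ha with h1|h1|h1|h1|h1|h1|h1 <;>
                rcases mem_daysKeysA_cases b hb with h2|h2|h2|h2|h2|h2|h2 <;>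
                subst h1 <;> subst h2 <;> decide
            · simp only [Bool.and_eq_true]
              rw [if_neg (by tauto), if_neg (by tauto)]
          · simp only [Bool.and_eq_true]
            rw [if_neg (by tauto), if_neg (by tauto)]
        | cons c t3 => rfl

-- ===== VERDICT (by name: the statement is the Claim_ definition above) =====
theorem expand_days_spec : Claim_equal_expand_days := by
  intro days _ _
  unfold Spec_expand_days expand_days expand_days_alt
  have : ∀ (init : List String) (l : List String),
      l.foldl (fun day_list r =>
        if PySem.Str.isIn "-" r then
          match pySplitA r "-" with
          | [start, stop] =>
            if daysKeysA.contains start && daysKeysA.contains stop then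
              let start_idx := (PySem.List.index? daysKeysA start).getD 0
              let end_idx := (PySem.List.index? daysKeysA stop).getD 0
              if start_idx ≤ end_idx then
                day_list ++ PySem.List.slice daysKeysA (some (start_idx : Int)) (some ((end_idx : Int) + 1))
              else
                (day_list ++ PySem.List.slice daysKeysA (some (start_idx : Int)) none)
                  ++ PySem.List.slice daysKeysA none (some ((end_idx : Int) + 1))
            else day_list
          | _ => day_list
        else if daysKeysA.contains r then day_list ++ [r] else day_list) init
      = init ++ l.flatMap expandTokenB := by
    intro init l
    induction l generalizing init with
    | nil => simp
    | cons x xs ih =>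
      simp only [List.foldl_cons, List.flatMap_cons]
      rw [bodyA_append, token_eq, ih, List.append_assoc]
  simpa using this [] (pySplitA days ",")
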